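-- pv_equiv track=rewrite | github.com/BluePhoenix01/Coding-Bat | Recursion 1/parenBit.py | parenBit
-- ===== SOURCE A (Python) =====
-- def parenBit(str):
--     if len(str) == 0:
--         return ""
--     start = 1
--     end = -1
--     if str[-1] == ")":
--         end = len(str)
--     if str[0] == "(":
--         start = 0
--     if str[-1] == ")" and str[0] == "(":
--         return str
--     return parenBit(str[start:end])
-- ===== SOURCE B (Python) =====
-- def parenBit(str):
--     i, j = 0, len(str) - 1
--     while i <= j:
--         if str[i] == "(" and str[j] == ")":
--             return str[i:j + 1]
--         if str[i] != "(":
--             i += 1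
--         if str[j] != ")":
--             j -= 1
--     return ""
-- ===== Notes on version B (the rewrite author's own statement) =====
-- stated objective: faster
-- what changed: Replaces A's recursion with repeated slicing (each step copies a shorter string) by an in-place two-pointer index loop that trims both ends simultaneously and slices once at the end.
import Mathlib
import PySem

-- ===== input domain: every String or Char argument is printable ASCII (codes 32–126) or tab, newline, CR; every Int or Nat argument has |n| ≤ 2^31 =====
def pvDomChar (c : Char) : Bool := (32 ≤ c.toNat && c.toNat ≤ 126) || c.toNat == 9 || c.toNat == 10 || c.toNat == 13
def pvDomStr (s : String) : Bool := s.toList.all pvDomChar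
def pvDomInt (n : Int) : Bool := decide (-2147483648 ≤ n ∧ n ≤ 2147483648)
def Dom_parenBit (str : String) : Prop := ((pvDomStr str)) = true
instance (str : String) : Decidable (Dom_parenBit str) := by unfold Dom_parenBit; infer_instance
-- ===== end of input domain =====

-- B replaces A's recursion-with-slicing by a two-pointer index loop that trims both ends
-- simultaneously and slices once at the end (alternative decomposition; same return value).

-- ===== PORT A =====
def parenBit (str : String) : String :=
  if PySem.Str.len str = 0 then ""
  else
    let start : Int := if PySem.Str.pyGet? str 0 = some '(' then 0 else 1
    let stop : Int := if PySem.Str.pyGet? str (-1) = some ')' then PySem.Str.len str else -1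
    if PySem.Str.pyGet? str (-1) = some ')' ∧ PySem.Str.pyGet? str 0 = some '(' then str
    else parenBit (PySem.Str.slice str (some start) (some stop))
termination_by str.toList.length
decreasing_by
  have hno : ¬ (PySem.Str.pyGet? str (-1) = some ')' ∧ PySem.Str.pyGet? str 0 = some '(') := by
    assumption
  have h0 : str.toList.length ≠ 0 := by
    simpa [PySem.Str.len_eq, String.length_toList] using (by assumption : ¬ PySem.Str.len str = 0)
  have hlen : PySem.Str.len str = (str.toList.length : Int) := by
    simp [PySem.Str.len_eq, String.length_toList]
  simp only [PySem.Str.toList_slice, PySem.Chars.slice_eq_listSlice, PySem.List.length_slice, hlen]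
  have c1 : PySem.List.clampIdx str.toList.length 0 = 0 := by
    unfold PySem.List.clampIdx; split_ifs <;> omega
  have c2 : PySem.List.clampIdx str.toList.length 1 = 1 := by
    unfold PySem.List.clampIdx; split_ifs <;> omega
  have c3 : PySem.List.clampIdx str.toList.length (-1) = str.toList.length - 1 := by
    unfold PySem.List.clampIdx; split_ifs <;> omega
  have c4 : PySem.List.clampIdx str.toList.length (str.toList.length : Int) = str.toList.length := by
    unfold PySem.List.clampIdx; split_ifs <;> omega
  split_ifs with hA hB hB
  · exact absurd ⟨hA, hB⟩ hno
  all_goals simp only [c1, c2, c3, c4] <;> omega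

-- ===== PORT B =====
def parenBitLoop (str : String) (i j : Int) : String :=
  if i ≤ j then
    if PySem.Str.pyGet? str i = some '(' ∧ PySem.Str.pyGet? str j = some ')' then
      PySem.Str.slice str (some i) (some (j + 1))
    else
      let i' : Int := if PySem.Str.pyGet? str i ≠ some '(' then i + 1 else i
      let j' : Int := if PySem.Str.pyGet? str j ≠ some ')' then j - 1 else j
      parenBitLoop str i' j'
  else ""
termination_by (j + 1 - i).toNat
decreasing_by
  split_ifs <;> simp_all <;> omega

def parenBit_alt (str : String) : String :=
  parenBitLoop str 0 (PySem.Str.len str - 1)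

-- ===== PRECONDITION & SPEC =====
def Spec_parenBit (str : String) (out : String) : Prop := out = parenBit_alt str
instance (str : String) (out : String) : Decidable (Spec_parenBit str out) := by unfold Spec_parenBit; infer_instance

-- ===== CLAIM (what is proved, stated in full; the proofs are below) =====
def Claim_equal_parenBit : Prop := ∀ (str : String), Dom_parenBit str → Spec_parenBit str (parenBit str)

-- ===== LEMMAS AND PROOFS =====

-- the common both-ends trimming spine, on lists of characters
def pvL (l : List Char) : List Char :=
  if _h : l = [] then []
  else
    if l.head? = some '(' then
      if l.getLast? = some ')' then l else pvL l.dropLast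
    else
      if l.getLast? = some ')' then pvL l.tail else pvL l.tail.dropLast
termination_by l.length
decreasing_by
  all_goals
    (have : 0 < l.length := List.length_pos_iff.mpr _h;
     simp [List.length_dropLast, List.length_tail]; omega)

theorem parenBit_toList : ∀ (n : Nat) (s : String), s.toList.length ≤ n →
    (parenBit s).toList = pvL s.toList := by
  intro n
  induction n with
  | zero =>
    intro s hs
    have hnil : s.toList = [] := List.eq_nil_of_length_eq_zero (by omega)
    rw [parenBit, if_pos (by rw [PySem.Str.len_eq, hnil]; simp), pvL]
    simp [hnil]
  | succ n ih =>
    intro s hs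
    by_cases h0 : PySem.Str.len s = 0
    · have hnil : s.toList = [] := by
        have h := h0
        rw [PySem.Str.len_eq] at h
        exact List.eq_nil_of_length_eq_zero (by exact_mod_cast h)
      rw [parenBit, if_pos h0, pvL]
      simp [hnil]
    · have hne : s.toList ≠ [] := by
        intro h; apply h0
        rw [PySem.Str.len_eq, h]
        simp
      have hlen : 0 < s.toList.length := List.length_pos_iff.mpr hne
      obtain ⟨c, t, hct⟩ : ∃ c t, s.toList = c :: t := by
        cases h : s.toList with
        | nil => exact absurd h hne
        | cons c t => exact ⟨c, t, rfl⟩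
      have hg0 : PySem.List.pyGet? s.toList 0 = s.toList.head? := by
        rw [hct, PySem.List.pyGet?_zero_cons, List.head?_cons]
      have hgm1 : PySem.List.pyGet? s.toList (-1) = s.toList.getLast? :=
        PySem.List.pyGet?_neg_one s.toList
      by_cases hH : s.toList.head? = some '(' <;> by_cases hL : s.toList.getLast? = some ')'
      · -- both match: A returns str
        rw [parenBit, if_neg h0]
        rw [pvL, dif_neg hne, if_pos hH, if_pos hL]
        simp [hg0, hgm1, hH, hL]
      · -- head '(' , last not ')': recurse on dropLast
        have harg : (PySem.Str.slice s (some 0) (some (-1))).toList = s.toList.dropLast := by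
          simp [PySem.Str.toList_slice, PySem.List.slice_to_neg_one]
        rw [parenBit, if_neg h0]
        rw [pvL, dif_neg hne, if_pos hH, if_neg hL]
        simp [hg0, hgm1, hH, hL]
        rw [ih _ (by have h2 : s.toList.length = s.length := String.length_toList; rw [harg]; simp [List.length_dropLast]; omega), harg]
      · -- head not '(' , last ')': recurse on tail
        have harg : (PySem.Str.slice s (some 1) (some ((s.length : Int)))).toList
            = s.toList.tail := by
          simp only [PySem.Str.toList_slice, PySem.Chars.slice_eq_listSlice]
          rw [PySem.List.slice_toNat _ (by norm_num) (by positivity)]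
          norm_num [List.drop_one]
        rw [parenBit, if_neg h0]
        rw [pvL, dif_neg hne, if_neg hH, if_pos hL]
        simp [hg0, hgm1, hH, hL]
        rw [ih _ (by have h2 : s.toList.length = s.length := String.length_toList; rw [harg]; simp [List.length_tail]; omega), harg]
      · -- neither: recurse on tail.dropLast
        have harg : (PySem.Str.slice s (some 1) (some (-1))).toList
            = s.toList.tail.dropLast := by
          simp only [PySem.Str.toList_slice, PySem.Chars.slice_eq_listSlice, PySem.List.slice]
          have c2 : PySem.List.clampIdx s.toList.length 1 = 1 := by
            unfold PySem.List.clampIdx; split_ifs <;> omega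
          have c3 : PySem.List.clampIdx s.toList.length (-1) = s.toList.length - 1 := by
            unfold PySem.List.clampIdx; split_ifs <;> omega
          rw [c2, c3, List.drop_one, List.dropLast_eq_take]
          congr 1
          simp [List.length_tail]
        rw [parenBit, if_neg h0]
        rw [pvL, dif_neg hne, if_neg hH, if_neg hL]
        simp [hg0, hgm1, hH, hL]
        rw [ih _ (by have h2 : s.toList.length = s.length := String.length_toList; rw [harg]; simp [List.length_dropLast, List.length_tail]; omega), harg]

theorem loop_toList : ∀ (n : Nat) (s : String) (i j : Int), 0 ≤ i → -1 ≤ j →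
    j < (s.toList.length : Int) → (j + 1 - i).toNat ≤ n →
    (parenBitLoop s i j).toList = pvL (PySem.List.slice s.toList (some i) (some (j + 1))) := by
  intro n
  induction n with
  | zero =>
    intro s i j hi hj1 hjl hn
    have hij : ¬ i ≤ j := by omega
    rw [parenBitLoop, if_neg hij]
    have hsl : PySem.List.slice s.toList (some i) (some (j + 1)) = [] := by
      rw [PySem.List.slice_toNat _ hi (by omega)]
      have hz : ((j + 1).toNat - i.toNat) = 0 := by omega
      simp [hz]
    rw [hsl, pvL]
    simp
  | succ n ih =>
    intro s i j hi hj1 hjl hn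
    by_cases hij : i ≤ j
    · have hj0 : 0 ≤ j := by omega
      rw [PySem.List.slice_toNat _ hi (by omega)]
      have hm : (0:Nat) < (j + 1).toNat - i.toNat := by omega
      have hwlen : (List.take ((j + 1).toNat - i.toNat) (List.drop i.toNat s.toList)).length
          = (j + 1).toNat - i.toNat := by
        have h2 : s.toList.length = s.length := String.length_toList
        simp [List.length_take, List.length_drop]
        omega
      have hwne : List.take ((j + 1).toNat - i.toNat) (List.drop i.toNat s.toList) ≠ [] := by
        intro h; rw [h] at hwlen; simp at hwlen; omega
      have hhead : (List.take ((j + 1).toNat - i.toNat) (List.drop i.toNat s.toList)).head?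
          = s.toList[i.toNat]? := by
        rw [List.head?_eq_getElem?, List.getElem?_take_of_lt hm, List.getElem?_drop]
        simp
      have hlast : (List.take ((j + 1).toNat - i.toNat) (List.drop i.toNat s.toList)).getLast?
          = s.toList[j.toNat]? := by
        rw [List.getLast?_eq_getElem?, hwlen,
          List.getElem?_take_of_lt (by omega), List.getElem?_drop]
        congr 1
        omega
      have hgi : PySem.List.pyGet? s.toList i = s.toList[i.toNat]? := by
        rw [PySem.List.pyGet?_of_nonneg _ hi]
      have hgj : PySem.List.pyGet? s.toList j = s.toList[j.toNat]? := by
        rw [PySem.List.pyGet?_of_nonneg _ hj0]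
      rw [parenBitLoop, if_pos hij]
      by_cases hA : s.toList[i.toNat]? = some '(' <;>
        by_cases hB : s.toList[j.toNat]? = some ')'
      · -- return the slice
        rw [if_pos (by simp [hgi, hgj, hA, hB])]
        rw [pvL, dif_neg hwne, if_pos (by rw [hhead]; exact hA), if_pos (by rw [hlast]; exact hB)]
        simp only [PySem.Str.toList_slice, PySem.Chars.slice_eq_listSlice]
        rw [PySem.List.slice_toNat _ hi (by omega)]
      · -- j moves
        rw [if_neg (by simp [hgi, hgj, hA, hB])]
        simp [hgi, hgj, hA, hB]
        rw [pvL, dif_neg hwne, if_pos (by rw [hhead]; exact hA), if_neg (by rw [hlast]; exact hB)]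
        rw [ih s i (j - 1) hi (by omega) (by omega) (by omega)]
        rw [PySem.List.slice_toNat _ hi (by omega)]
        congr 1
        rw [List.dropLast_eq_take, hwlen, List.take_take]
        congr 1
        omega
      · -- i moves
        rw [if_neg (by simp [hgi, hgj, hA, hB])]
        simp [hgi, hgj, hA, hB]
        rw [pvL, dif_neg hwne, if_neg (by rw [hhead]; exact hA), if_pos (by rw [hlast]; exact hB)]
        rw [ih s (i + 1) j (by omega) (by omega) (by omega) (by omega)]
        rw [PySem.List.slice_toNat _ (by omega) (by omega)]
        congr 1
        rw [← List.drop_one, List.drop_take, List.drop_drop]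
        congr 1
        · omega
        · congr 1; omega
      · -- both move
        rw [if_neg (by simp [hgi, hgj, hA, hB])]
        simp [hgi, hgj, hA, hB]
        rw [pvL, dif_neg hwne, if_neg (by rw [hhead]; exact hA), if_neg (by rw [hlast]; exact hB)]
        rw [ih s (i + 1) (j - 1) (by omega) (by omega) (by omega) (by omega)]
        rw [PySem.List.slice_toNat _ (by omega) (by omega)]
        congr 1
        rw [← List.drop_one, List.drop_take, List.drop_drop, List.dropLast_eq_take]
        simp only [List.length_take, List.length_drop]
        rw [List.take_take]
        congr 1
        · omega
        · congr 1; omega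
    · rw [parenBitLoop, if_neg hij]
      have hsl : PySem.List.slice s.toList (some i) (some (j + 1)) = [] := by
        rw [PySem.List.slice_toNat _ hi (by omega)]
        have hz : ((j + 1).toNat - i.toNat) = 0 := by omega
        simp [hz]
      rw [hsl, pvL]
      simp

-- ===== VERDICT (by name: the statement is the Claim_ definition above) =====
theorem parenBit_spec : Claim_equal_parenBit := by
  intro s _
  unfold Spec_parenBit
  apply String.toList_inj.mp
  rw [parenBit_toList s.toList.length s (le_refl _)]
  unfold parenBit_alt
  have hlen : PySem.Str.len s = (s.toList.length : Int) := by
    rw [PySem.Str.len_eq]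
  rw [loop_toList ((PySem.Str.len s - 1 + 1 - 0).toNat) s 0 (PySem.Str.len s - 1)
    (by norm_num) (by rw [hlen]; omega) (by rw [hlen]; omega) (le_refl _)]
  congr 1
  rw [hlen]
  have h1 : (s.toList.length : Int) - 1 + 1 = (s.toList.length : Int) := by ring
  rw [h1, PySem.List.slice_toNat _ (by norm_num) (by positivity)]
  simp
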